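-- pv_equiv track=rewrite | github.com/MarkCarbonell98/UniSecondSemester | algorithmen_und_datenstrukturen/ubungen/ubung4/musterlosung-ubung2/sort.py | checkSort
-- ===== SOURCE A (Python) =====
-- import copy
--
-- def checkSort(inList, outList):
--
--     #make a copy of the out list
--     outListc = copy.deepcopy(outList)
--     #compare lenghts
--     if len(inList) != len(outList):
--         return False
--     #check for all elements to be the same
--     for x in inList:
--         try:
--             outListc.remove(x)
--         except:
--             return False
--     #check for all elements being sorted properly
--     for i in range(len(outList) - 1):
--         if outList[i] > outList[i + 1]:
--             return False
--     #all tests passed, return True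
--     return True
-- ===== SOURCE B (Python) =====
-- def checkSort(inList, outList):
--     return sorted(inList) == outList
-- ===== Notes on version B (the rewrite author's own statement) =====
-- stated objective: simpler
-- what changed: Replaces A's O(n^2) multiset-removal loop plus separate adjacency scan with a single sort-and-compare: sorted(inList) == outList.
import Mathlib
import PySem

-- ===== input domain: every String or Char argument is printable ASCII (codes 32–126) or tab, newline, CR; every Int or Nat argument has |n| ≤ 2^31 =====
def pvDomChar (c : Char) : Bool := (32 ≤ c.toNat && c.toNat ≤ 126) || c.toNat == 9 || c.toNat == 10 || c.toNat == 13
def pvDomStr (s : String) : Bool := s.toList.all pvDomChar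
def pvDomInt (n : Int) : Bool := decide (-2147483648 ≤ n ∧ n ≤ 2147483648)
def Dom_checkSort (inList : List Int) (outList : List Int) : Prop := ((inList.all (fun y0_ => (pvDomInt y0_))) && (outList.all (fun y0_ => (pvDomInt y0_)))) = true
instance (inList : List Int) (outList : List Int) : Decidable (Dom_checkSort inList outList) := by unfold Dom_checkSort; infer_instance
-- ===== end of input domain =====

-- B replaces A's quadratic removal loop + adjacency scan by one sort-and-compare (objective: simpler).

-- ===== PORT A =====
-- the 'for x in inList: outListc.remove(x)' loop; none = some remove raised ValueError (A returns False)
def pvRemoveAll (xs : List Int) (outc : List Int) : Option (List Int) :=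
  match xs with
  | [] => some outc
  | x :: rest =>
    match PySem.List.remove? outc x with
    | none => none
    | some outc' => pvRemoveAll rest outc'

-- the 'for i in range(len(outList)-1): if outList[i] > outList[i+1]: return False' scan
def pvSortedScan : List Int → Bool
  | [] => true
  | [_] => true
  | a :: b :: rest => if a > b then false else pvSortedScan (b :: rest)

def checkSort (inList : List Int) (outList : List Int) : Bool :=
  if inList.length ≠ outList.length then false
  else
    match pvRemoveAll inList outList with
    | none => false
    | some _ => pvSortedScan outList

-- ===== PORT B =====
def checkSort_alt (inList : List Int) (outList : List Int) : Bool :=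
  PySem.List.sorted inList (fun x => x) false == outList

-- ===== PRECONDITION & SPEC =====
def Spec_checkSort (inList : List Int) (outList : List Int) (out : Bool) : Prop := out = checkSort_alt inList outList
instance (inList : List Int) (outList : List Int) (out : Bool) : Decidable (Spec_checkSort inList outList out) := by unfold Spec_checkSort; infer_instance

-- ===== CLAIM (what is proved, stated in full; the proofs are below) =====
def Claim_equal_checkSort : Prop := ∀ (inList : List Int) (outList : List Int), Dom_checkSort inList outList → Spec_checkSort inList outList (checkSort inList outList)

-- ===== LEMMAS AND PROOFS =====

theorem pvRemoveAll_some_perm {xs ys r : List Int} (h : pvRemoveAll xs ys = some r) :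
    ys.Perm (xs ++ r) := by
  induction xs generalizing ys with
  | nil => simp [pvRemoveAll] at h; simp [h]
  | cons x rest ih =>
    unfold pvRemoveAll at h
    cases hr : PySem.List.remove? ys x with
    | none => simp [hr] at h
    | some ys' =>
      simp [hr] at h
      have hx : x ∈ ys := by
        by_contra hn
        rw [(PySem.List.remove?_eq_none_iff ys x).mpr hn] at hr; cases hr
      have hy : ys' = ys.erase x := by
        rw [PySem.List.remove?_eq_some_erase ys x hx] at hr
        exact (Option.some_inj.mp hr).symm
      subst hy
      show ys.Perm (x :: (rest ++ r))
      exact (List.perm_cons_erase hx).trans ((ih h).cons x)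

theorem pvRemoveAll_of_perm {xs ys : List Int} (h : xs.Perm ys) :
    pvRemoveAll xs ys = some [] := by
  induction xs generalizing ys with
  | nil => simp [pvRemoveAll]; exact (List.Perm.nil_eq h).symm
  | cons x rest ih =>
    have hx : x ∈ ys ∧ rest.Perm (ys.erase x) := List.cons_perm_iff_perm_erase.mp h
    simp only [pvRemoveAll, PySem.List.remove?_eq_some_erase ys x hx.1]
    exact ih hx.2

theorem pvSortedScan_iff (ys : List Int) :
    pvSortedScan ys = true ↔ ys.Pairwise (· ≤ ·) := by
  induction ys with
  | nil => simp [pvSortedScan]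
  | cons a t ih =>
    cases t with
    | nil => simp [pvSortedScan]
    | cons b r =>
      rw [List.pairwise_cons]
      by_cases hab : a > b
      · simp only [pvSortedScan, if_pos hab]
        constructor
        · intro h; cases h
        · rintro ⟨h1, _⟩; exact absurd (h1 b (by simp)) (by omega)
      · simp only [pvSortedScan, if_neg hab]
        rw [ih]
        constructor
        · intro h
          refine ⟨?_, h⟩
          intro y hy
          rcases List.mem_cons.mp hy with rfl | hy
          · omega
          · have hb := (List.pairwise_cons.mp h).1 y hy
            omega
        · rintro ⟨_, h⟩; exact h

-- ===== VERDICT (by name: the statement is the Claim_ definition above) =====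
theorem checkSort_spec : Claim_equal_checkSort := by
  intro inList outList _
  show checkSort inList outList = checkSort_alt inList outList
  unfold checkSort checkSort_alt
  rw [Bool.eq_iff_iff, beq_iff_eq]
  constructor
  · intro h
    split at h
    · cases h
    · rename_i hlen
      cases hr : pvRemoveAll inList outList with
      | none => rw [hr] at h; cases h
      | some r =>
        rw [hr] at h
        have hperm := pvRemoveAll_some_perm hr
        have hr0 : r = [] := by
          have := hperm.length_eq
          simp at this
          have : r.length = 0 := by omega
          exact List.length_eq_zero_iff.mp this
        subst hr0
        simp at hperm
        exact PySem.List.sorted_id_eq_of_perm_of_pairwise inList outList hperm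
          ((pvSortedScan_iff outList).mp h)
  · intro h
    have hperm : outList.Perm inList := h ▸ PySem.List.sorted_perm inList (fun x => x) false
    have hpw : outList.Pairwise (· ≤ ·) := by
      have := PySem.List.sorted_pairwise inList (fun x => x)
      rw [h] at this
      exact this
    rw [if_neg (by simp [hperm.length_eq]), pvRemoveAll_of_perm hperm.symm]
    exact (pvSortedScan_iff outList).mpr hpw
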